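-- pv_equiv track=rewrite | github.com/anniseppanen/Tietorakenteet-ja-algoritmit-I | Tehokkaat algoritmit/forbidden.py | count
-- ===== SOURCE A (Python) =====
-- def count(s):
--     n = len(s)
--     a = -1
--     result = 0
--     for i in range(n):
--         # Jos ollaan a:n kohdalla menossa, merkataan, että edellinen a on ollut i:ssä
--         if s[i] == "a":
--             a = i
--         else:
--             # Lasketaan tulokseen a:sta i:hin olevien osajonojen lukumäärä. Kaava toimii myös,
--             # kun a:ta ei ole vielä tullut, sillä a on alustettu -1:ksi
--             result += i-a
--     return result
-- ===== SOURCE B (Python) =====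
-- def count(s):
--     return sum(len(p) * (len(p) + 1) // 2 for p in s.split("a"))
-- ===== Notes on version B (the rewrite author's own statement) =====
-- stated objective: simpler
-- what changed: Replaces the stateful last-separator-index loop with a split of the string on the forbidden letter into maximal runs plus the closed-form triangular number L*(L+1)//2 per run.
import Mathlib
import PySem

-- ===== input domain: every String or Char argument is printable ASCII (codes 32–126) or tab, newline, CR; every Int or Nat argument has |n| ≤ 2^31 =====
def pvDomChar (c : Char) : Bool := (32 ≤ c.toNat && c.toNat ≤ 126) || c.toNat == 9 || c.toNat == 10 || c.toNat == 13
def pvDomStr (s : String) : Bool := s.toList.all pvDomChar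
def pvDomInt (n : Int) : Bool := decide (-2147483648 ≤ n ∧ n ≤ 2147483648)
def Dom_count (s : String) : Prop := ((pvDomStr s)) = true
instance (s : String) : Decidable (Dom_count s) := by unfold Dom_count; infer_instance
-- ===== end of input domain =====

-- B replaces A's stateful last-'a'-index loop by splitting on 'a' and summing the
-- closed-form triangular number L*(L+1)//2 over the runs (objective: simpler).

-- ===== PORT A =====
-- 'for i in range(n)' with s[i] (always in range) becomes a foldl over range(0, n)
-- carrying the state (a, result); s[i] is read with pyGetD (the default is never used).
def count (s : String) : Int :=
  let n : Int := PySem.Str.len s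
  let st := (PySem.List.pyRange 0 n 1).foldl
    (fun (st : Int × Int) i =>
      if PySem.List.pyGetD s.toList i ' ' = 'a' then (i, st.2)
      else (st.1, st.2 + (i - st.1)))
    (-1, 0)
  st.2

-- ===== PORT B =====
-- s.split("a") with the nonempty separator "a" is PySem.Chars.splitOn on the code points.
def count_alt (s : String) : Int :=
  (PySem.Chars.splitOn s.toList "a".toList).map
    (fun p => PySem.Int.floordiv ((p.length : Int) * ((p.length : Int) + 1)) 2)
    |>.sum

-- ===== PRECONDITION & SPEC =====
def Spec_count (s : String) (out : Int) : Prop := out = count_alt s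
instance (s : String) (out : Int) : Decidable (Spec_count s out) := by unfold Spec_count; infer_instance

-- ===== CLAIM (what is proved, stated in full; the proofs are below) =====
def Claim_equal_count : Prop := ∀ (s : String), Dom_count s → Spec_count s (count s)

-- ===== LEMMAS AND PROOFS =====

-- Reference splitter: split a character list on the single character 'a'.
def sp : List Char → List (List Char)
  | [] => [[]]
  | c :: t =>
    if c = 'a' then [] :: sp t
    else
      match sp t with
      | [] => [[c]]
      | h :: r => (c :: h) :: r

lemma sp_ne_nil (l : List Char) : sp l ≠ [] := by
  cases l with
  | nil => simp [sp]
  | cons c t =>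
    simp only [sp]
    split_ifs
    · simp
    · cases sp t <;> simp

lemma splitOn_go_eq (fuel : Nat) (l cur : List Char) (acc : List (List Char))
    (h : l.length < fuel) :
    PySem.Chars.splitOn.go ['a'] fuel l cur acc =
      acc.reverse ++ (match sp l with
        | [] => []
        | hd :: r => (cur.reverse ++ hd) :: r) := by
  induction fuel generalizing l cur acc with
  | zero => omega
  | succ n ih =>
    cases l with
    | nil =>
      rw [PySem.Chars.splitOn.go.eq_def]
      simp [sp]
    | cons c rest =>
      rw [PySem.Chars.splitOn.go.eq_def]
      simp only [List.isPrefixOf, Bool.and_true]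
      by_cases hc : c = 'a'
      · subst hc
        simp only [beq_self_eq_true, if_pos, List.length_cons, List.length_nil,
          Nat.zero_add, List.drop_succ_cons, List.drop_zero] at *
        rw [ih rest [] (List.reverse cur :: acc) (by omega)]
        have hne := sp_ne_nil rest
        cases hsp : sp rest with
        | nil => exact absurd hsp hne
        | cons hd r => simp [sp, hsp]
      · rw [if_neg (show ¬ ('a' == c) = true by simp only [beq_iff_eq]; exact fun h => hc h.symm)]
        rw [ih rest (c :: cur) acc (by simp at h ⊢; omega)]
        have hne := sp_ne_nil rest
        cases hsp : sp rest with
        | nil => exact absurd hsp hne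
        | cons hd r => simp [sp, hc, hsp]

lemma splitOn_eq_sp (l : List Char) :
    PySem.Chars.splitOn l ['a'] = sp l := by
  show PySem.Chars.splitOn.go ['a'] (l.length + 1) l [] [] = sp l
  rw [splitOn_go_eq (l.length + 1) l [] [] (by omega)]
  have hne := sp_ne_nil l
  cases hsp : sp l with
  | nil => exact absurd hsp hne
  | cons hd r => simp

-- triangular number (as a Nat, then cast)
def tri (m : Nat) : Int := ((m * (m + 1) / 2 : Nat) : Int)

lemma tri_succ (d : Nat) : tri (d + 1) = tri d + (d + 1) := by
  unfold tri
  obtain ⟨k, hk⟩ := Nat.even_mul_succ_self d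
  have h2 : (d + 1) * (d + 1 + 1) = (k + d + 1) + (k + d + 1) := by
    have hx : (d + 1) * (d + 1 + 1) = d * (d + 1) + 2 * (d + 1) := by ring
    omega
  rw [h2, hk]
  have ha : (k + k) / 2 = k := by omega
  have hb : ((k + d + 1) + (k + d + 1)) / 2 = k + d + 1 := by omega
  rw [ha, hb]
  push_cast
  ring

-- the weight B assigns to one part
lemma floordiv_eq_tri (p : List Char) :
    PySem.Int.floordiv ((p.length : Int) * ((p.length : Int) + 1)) 2 = tri p.length := by
  have : ((p.length : Int) * ((p.length : Int) + 1)) = ((p.length * (p.length + 1) : Nat) : Int) := by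
    push_cast; ring
  rw [this]
  exact_mod_cast PySem.Int.floordiv_natCast (p.length * (p.length + 1)) 2

-- A's per-run accumulator, with the current value of i - a as the parameter
def g : List Char → Int → Int
  | [], _ => 0
  | c :: t, d => if c = 'a' then g t 1 else d + g t (d + 1)

-- A's loop over enumerate equals g
lemma foldl_enum_eq_g (l : List Char) (i a r : Int) :
    ((PySem.List.enumerate l i).foldl
      (fun (st : Int × Int) p =>
        if p.2 = 'a' then (p.1, st.2) else (st.1, st.2 + (p.1 - st.1)))
      (a, r)).2 = r + g l (i - a) := by
  induction l generalizing i a r with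
  | nil => simp [PySem.List.enumerate_nil, g]
  | cons c t ih =>
    rw [PySem.List.enumerate_cons]
    simp only [List.foldl_cons, g]
    by_cases hc : c = 'a'
    · simp only [hc, ↓reduceIte]
      rw [ih]
      have : i + 1 - i = 1 := by ring
      rw [this]
    · simp only [hc, ↓reduceIte]
      rw [ih]
      have : i + 1 - a = (i - a) + 1 := by ring
      rw [this]
      ring

-- g at parameter d+1 in terms of the sp decomposition
lemma g_eq_sp (l : List Char) (d : Nat) :
    g l ((d : Int) + 1) =
      tri (d + ((sp l).headI).length) - tri d + (((sp l).tail).map (fun p => tri p.length)).sum := by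
  induction l generalizing d with
  | nil => simp [g, sp]
  | cons c t ih =>
    by_cases hc : c = 'a'
    · subst hc
      simp only [g, sp, List.headI, List.tail]
      have h0 := ih 0
      have hne := sp_ne_nil t
      cases hsp : sp t with
      | nil => exact absurd hsp hne
      | cons hd r =>
        rw [hsp] at h0
        simp only [List.headI, List.tail] at h0
        have : (1 : Int) = ((0 : Nat) : Int) + 1 := by norm_num
        rw [this, h0]
        simp [tri]
    · simp only [g, sp, hc, if_false]
      have hne := sp_ne_nil t
      cases hsp : sp t with
      | nil => exact absurd hsp hne
      | cons hd r =>
        have h1 := ih (d + 1)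
        rw [hsp] at h1
        simp only [List.headI, List.tail] at h1 ⊢
        have : (d : Int) + 1 + 1 = ((d + 1 : Nat) : Int) + 1 := by push_cast; ring
        rw [this, h1]
        have harr : d + 1 + hd.length = d + (c :: hd).length := by simp; omega
        rw [harr]
        have := tri_succ d
        omega

-- count in terms of g
lemma count_eq_g (s : String) : count s = g s.toList 1 := by
  unfold count
  have henum := PySem.List.enumerate_eq_map_pyRange s.toList ' '
  have hlen : PySem.Str.len s = PySem.List.len s.toList := by
    simp [PySem.Str.len_eq, PySem.List.len]
  rw [hlen]
  have hfold :
      ((PySem.List.pyRange 0 (PySem.List.len s.toList) 1).foldl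
        (fun (st : Int × Int) i =>
          if PySem.List.pyGetD s.toList i ' ' = 'a' then (i, st.2)
          else (st.1, st.2 + (i - st.1)))
        (-1, 0)).2
      = ((PySem.List.enumerate s.toList).foldl
          (fun (st : Int × Int) p =>
            if p.2 = 'a' then (p.1, st.2) else (st.1, st.2 + (p.1 - st.1)))
          (-1, 0)).2 := by
    rw [henum, List.foldl_map]
  rw [hfold, foldl_enum_eq_g]
  norm_num

-- ===== VERDICT (by name: the statement is the Claim_ definition above) =====
theorem count_spec : Claim_equal_count := by
  intro s _
  show count s = count_alt s
  unfold count_alt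
  have hlist : "a".toList = ['a'] := rfl
  rw [hlist, splitOn_eq_sp, count_eq_g]
  have h := g_eq_sp s.toList 0
  norm_num at h
  rw [h]
  have hne := sp_ne_nil s.toList
  cases hsp : sp s.toList with
  | nil => exact absurd hsp hne
  | cons hd r =>
    simp only [List.headI, List.tail, List.map_cons, List.sum_cons, tri]
    simp only [floordiv_eq_tri]  -- rewrite each map element
    simp [tri]
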